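-- pv_equiv track=rewrite | github.com/cdfarrow/flextools | FlexTools/Modules/Chinese/Lib/segmenter.py | make_start_dict
-- ===== SOURCE A (Python) =====
-- def make_start_dict(lexeme_values):
--     """Return a dictionary of starting phrases of the lexemes.
--     If a character sequence occurs as the start of a lexical entry but not as
--     a lexical entry then it is in the dictionary with value None. If a character
--     sequence occurs as a lexical entry (regardless of whether it also occurs
--     at the start of another lexical entry) then its value is a list of possible
--     ids.
--
--     @param lexeme_values: iterator over (lexeme, value) tuples
--     @type lexeme_values: iterator
--     @return: dictionary of valid segments and initial portions of valid
--         segments. If the segment is valid it has a value. Initial portions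
--         of valid segments are in the dictionary with the value None.
--         Thus if 'abcd' is the valid segment with value 42 then the dictionary is
--         {'abcd': 42, 'abc': None, 'ab': None, 'a': None}
--         if 'ab' is also a valid segment with value 23 then the dictionary is
--         {'abcd': 42, 'abc': None, 'ab': 23, 'a': None}
--     @rtype: dictionary
--     """
--     start_dict = dict()
--     for lexeme, value in lexeme_values:
--         # put the lexeme in the dictionary
--         cur_value = start_dict.setdefault(lexeme, set())
--         if cur_value is None:
--             start_dict[lexeme] = cur_value = set()
--         cur_value.add(value)
--         #put beginning strings in the dictionary
--         lex_start = ''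
--         for segment in lexeme:
--             lex_start += segment
--             start_dict.setdefault(lex_start, None)
--     return start_dict
-- ===== SOURCE B (Python) =====
-- def make_start_dict(lexeme_values):
--     pairs = list(lexeme_values)
--     values = {}
--     for lexeme, value in pairs:
--         values.setdefault(lexeme, set()).add(value)
--     keys = []
--     for lexeme, _ in pairs:
--         keys.append(lexeme)
--         for i in range(1, len(lexeme)):
--             keys.append(lexeme[:i])
--     return {k: values.get(k) for k in dict.fromkeys(keys)}
-- ===== Notes on version B (the rewrite author's own statement) =====
-- stated objective: alternative
-- what changed: B replaces A's single interleaved loop (setdefault with a None-repair branch, in-place set mutation and incremental string building) by three separately shaped passes: one pass collecting the value set per lexeme, one pass emitting all prefix keys as slices, then an ordered dedup (dict.fromkeys) and a single comprehension assembling the result.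
import Mathlib
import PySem

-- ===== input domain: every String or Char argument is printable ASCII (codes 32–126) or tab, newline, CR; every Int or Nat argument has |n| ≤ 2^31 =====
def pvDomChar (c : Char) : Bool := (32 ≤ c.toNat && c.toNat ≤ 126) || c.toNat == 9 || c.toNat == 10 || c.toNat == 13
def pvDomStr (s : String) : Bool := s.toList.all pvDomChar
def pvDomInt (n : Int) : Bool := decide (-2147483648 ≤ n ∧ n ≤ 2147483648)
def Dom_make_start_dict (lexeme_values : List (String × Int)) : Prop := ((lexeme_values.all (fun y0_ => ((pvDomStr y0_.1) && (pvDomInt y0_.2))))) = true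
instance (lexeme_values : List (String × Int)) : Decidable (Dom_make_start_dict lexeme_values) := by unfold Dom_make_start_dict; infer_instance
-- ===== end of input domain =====

-- B is an alternative decomposition of the same job: A's single loop interleaving set mutation
-- (with a None-repair branch) and prefix seeding is split into a value-collection pass, a
-- prefix-key pass over slices, an ordered dedup, and one final assembling map (same cost).
-- A mutates nothing observable; equivalence is about the return value.

-- ===== PORT A =====
-- loop body of A's 'for lexeme, value in lexeme_values' (prefix part split off as the inner for-loop fold)
def pvStepACore (start_dict : PySem.Dict String (Option (List Int))) (lv : String × Int) :
    PySem.Dict String (Option (List Int)) :=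
  -- cur_value = start_dict.setdefault(lexeme, set())
  let d1 := start_dict.setdefault lv.1 (some [])
  let cur_value : Option (List Int) := (d1.get? lv.1).getD (some [])
  -- if cur_value is None: start_dict[lexeme] = cur_value = set()
  let p : PySem.Dict String (Option (List Int)) × List Int :=
    match cur_value with
    | none => (d1.insert lv.1 (some []), [])
    | some s => (d1, s)
  -- cur_value.add(value)  (the set object stored at lexeme is mutated in place)
  p.1.insert lv.1 (some (PySem.Set.add p.2 lv.2))

def pvStepA (start_dict : PySem.Dict String (Option (List Int))) (lv : String × Int) :
    PySem.Dict String (Option (List Int)) :=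
  -- lex_start = ''; for segment in lexeme: lex_start += segment; start_dict.setdefault(lex_start, None)
  (lv.1.toList.foldl
    (fun (st : String × PySem.Dict String (Option (List Int))) c =>
      let lex_start := st.1.push c
      (lex_start, st.2.setdefault lex_start none))
    ("", pvStepACore start_dict lv)).2

def make_start_dict (lexeme_values : List (String × Int)) : List (String × Option (List Int)) :=
  (lexeme_values.foldl pvStepA PySem.Dict.empty).items

-- ===== PORT B =====
-- values.setdefault(lexeme, set()).add(value)
def pvStepV (values : PySem.Dict String (List Int)) (lv : String × Int) :
    PySem.Dict String (List Int) :=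
  values.insert lv.1 (PySem.Set.add (values.getD lv.1 []) lv.2)

-- keys.append(lexeme); for i in range(1, len(lexeme)): keys.append(lexeme[:i])
def pvStepK (keys : List String) (lv : String × Int) : List String :=
  (keys ++ [lv.1]) ++
    (PySem.List.pyRange 1 (PySem.Str.len lv.1)).map (fun i => PySem.Str.slice lv.1 none (some i))

def make_start_dict_alt (lexeme_values : List (String × Int)) : List (String × Option (List Int)) :=
  let pairs := lexeme_values
  let values := pairs.foldl pvStepV PySem.Dict.empty
  let keys := pairs.foldl pvStepK []
  (PySem.List.dedup keys).map (fun k => (k, values.get? k))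

-- ===== PRECONDITION & SPEC =====
def Spec_make_start_dict (lexeme_values : List (String × Int)) (out : List (String × Option (List Int))) : Prop := out = make_start_dict_alt lexeme_values
instance (lexeme_values : List (String × Int)) (out : List (String × Option (List Int))) : Decidable (Spec_make_start_dict lexeme_values out) := by unfold Spec_make_start_dict; infer_instance

-- ===== CLAIM (what is proved, stated in full; the proofs are below) =====
def Claim_equal_make_start_dict : Prop := ∀ (lexeme_values : List (String × Int)), Dom_make_start_dict lexeme_values → Spec_make_start_dict lexeme_values (make_start_dict lexeme_values)

-- ===== LEMMAS AND PROOFS =====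

-- the set stored at key l (empty when absent or None)
def pvCurSet (d : PySem.Dict String (Option (List Int))) (l : String) : List Int :=
  match d.get? l with
  | some (some s) => s
  | _ => []

-- the prefix strings A's inner loop visits, in order (last one is the whole lexeme)
def pvPrefs (acc : String) : List Char → List String
  | [] => []
  | c :: cs => (acc.push c) :: pvPrefs (acc.push c) cs

-- the prefix strings B appends for one lexeme (the proper ones, by slicing)
def pvProps (l : String) : List String :=
  (PySem.List.pyRange 1 (PySem.Str.len l)).map (fun i => PySem.Str.slice l none (some i))

lemma pvStepK_eq (ks : List String) (lv : String × Int) :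
    pvStepK ks lv = ks ++ (lv.1 :: pvProps lv.1) := by
  simp [pvStepK, pvProps]

lemma pvStepACore_get? (d : PySem.Dict String (Option (List Int))) (lv : String × Int) (k : String) :
    (pvStepACore d lv).get? k =
      if k = lv.1 then some (some (PySem.Set.add (pvCurSet d lv.1) lv.2)) else d.get? k := by
  rcases h : d.get? lv.1 with _ | s
  · have hc : d.contains lv.1 = false := by
      rw [PySem.Dict.contains_eq_isSome_get?, h]; rfl
    simp [pvStepACore, pvCurSet, h, PySem.Dict.setdefault_of_not_contains _ _ hc,
      PySem.Dict.get?_insert, PySem.Dict.insert_insert_self]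
  · have hc : d.contains lv.1 = true := by
      rw [PySem.Dict.contains_eq_isSome_get?, h]; rfl
    rcases s with _ | s
    · simp [pvStepACore, pvCurSet, h, PySem.Dict.setdefault_of_contains _ _ hc,
        PySem.Dict.get?_insert, PySem.Dict.insert_insert_self]
    · simp [pvStepACore, pvCurSet, h, PySem.Dict.setdefault_of_contains _ _ hc,
        PySem.Dict.get?_insert]

lemma pvStepACore_keys (d : PySem.Dict String (Option (List Int))) (lv : String × Int) :
    (pvStepACore d lv).keys = PySem.Set.add d.keys lv.1 := by
  rcases h : d.get? lv.1 with _ | s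
  · have hc : d.contains lv.1 = false := by
      rw [PySem.Dict.contains_eq_isSome_get?, h]; rfl
    have hm : lv.1 ∉ d.keys := fun hmem =>
      by simp [(PySem.Dict.contains_iff_mem_keys d lv.1).mpr hmem] at hc
    simp [pvStepACore, PySem.Dict.setdefault_of_not_contains _ _ hc,
      PySem.Dict.insert_insert_self, PySem.Dict.keys_insert_of_not_contains _ _ hc,
      PySem.Set.add_of_not_mem hm]
  · have hc : d.contains lv.1 = true := by
      rw [PySem.Dict.contains_eq_isSome_get?, h]; rfl
    have hm : lv.1 ∈ d.keys := (PySem.Dict.contains_iff_mem_keys d lv.1).mp hc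
    rcases s with _ | s
    · simp [pvStepACore, h, PySem.Dict.setdefault_of_contains _ _ hc,
        PySem.Dict.insert_insert_self, PySem.Dict.keys_insert_of_contains _ _ hc,
        PySem.Set.add_of_mem hm]
    · simp [pvStepACore, h, PySem.Dict.setdefault_of_contains _ _ hc,
        PySem.Dict.keys_insert_of_contains _ _ hc, PySem.Set.add_of_mem hm]

lemma pvStepACore_contains (d : PySem.Dict String (Option (List Int))) (lv : String × Int) (k : String) :
    (pvStepACore d lv).contains k = (k == lv.1 || d.contains k) := by
  by_cases hk : k = lv.1
  · subst hk
    rw [PySem.Dict.contains_eq_isSome_get?, pvStepACore_get?]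
    simp
  · rw [PySem.Dict.contains_eq_isSome_get?, pvStepACore_get?, if_neg hk,
      ← PySem.Dict.contains_eq_isSome_get?]
    simp [hk]

-- the prefix loop of A is a fold of setdefaults over the prefix strings
lemma pvPrefFold_eq (cs : List Char) (acc : String) (d : PySem.Dict String (Option (List Int))) :
    (cs.foldl
      (fun (st : String × PySem.Dict String (Option (List Int))) c =>
        let lex_start := st.1.push c
        (lex_start, st.2.setdefault lex_start none))
      (acc, d)).2
    = (pvPrefs acc cs).foldl (fun d q => d.setdefault q none) d := by
  induction cs generalizing acc d with
  | nil => simp [pvPrefs]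
  | cons c cs ih => simp [pvPrefs, ih]

lemma pvSdFold_get? (qs : List String) (d : PySem.Dict String (Option (List Int))) (k : String) :
    (qs.foldl (fun d q => d.setdefault q none) d).get? k =
      if d.contains k = false ∧ k ∈ qs then some none else d.get? k := by
  induction qs generalizing d with
  | nil => simp
  | cons q qs ih =>
    rw [List.foldl_cons]
    by_cases hc : d.contains q = true
    · rw [PySem.Dict.setdefault_of_contains _ _ hc, ih]
      by_cases hk : k = q
      · subst hk; simp [hc]
      · simp [hk]
    · have hc' : d.contains q = false := by simpa using hc
      rw [PySem.Dict.setdefault_of_not_contains _ _ hc', ih]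
      by_cases hk : k = q
      · subst hk
        simp [PySem.Dict.get?_insert_self, hc']
      · simp [PySem.Dict.contains_insert, PySem.Dict.get?_insert_of_ne _ _ hk, hk]

lemma pvSdFold_keys (qs : List String) (d : PySem.Dict String (Option (List Int))) :
    (qs.foldl (fun d q => d.setdefault q none) d).keys = PySem.Set.update d.keys qs := by
  induction qs generalizing d with
  | nil => simp [PySem.Set.update_nil]
  | cons q qs ih =>
    rw [List.foldl_cons, ih, PySem.Set.update_cons]
    congr 1
    rw [PySem.Dict.keys_setdefault, PySem.Set.add_eq_ite]
    by_cases hc : d.contains q = true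
    · simp [hc, (PySem.Dict.contains_iff_mem_keys d q).mp hc]
    · have hc' : d.contains q = false := by simpa using hc
      have hm : q ∉ d.keys := fun hmem =>
        by simp [(PySem.Dict.contains_iff_mem_keys d q).mpr hmem] at hc'
      simp [hc', hm]

lemma pvStepA_get? (d : PySem.Dict String (Option (List Int))) (lv : String × Int) (k : String) :
    (pvStepA d lv).get? k =
      if k = lv.1 then some (some (PySem.Set.add (pvCurSet d lv.1) lv.2))
      else if d.contains k = false ∧ k ∈ pvPrefs "" lv.1.toList then some none
      else d.get? k := by
  rw [pvStepA, pvPrefFold_eq, pvSdFold_get?, pvStepACore_contains, pvStepACore_get?]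
  by_cases hk : k = lv.1
  · simp [hk]
  · simp [hk]

lemma pvStepA_keys (d : PySem.Dict String (Option (List Int))) (lv : String × Int) :
    (pvStepA d lv).keys = PySem.Set.update d.keys (lv.1 :: pvPrefs "" lv.1.toList) := by
  rw [pvStepA, pvPrefFold_eq, pvSdFold_keys, pvStepACore_keys, PySem.Set.update_cons]

lemma pvStepV_get? (d : PySem.Dict String (List Int)) (lv : String × Int) (k : String) :
    (pvStepV d lv).get? k =
      if k = lv.1 then some (PySem.Set.add (d.getD lv.1 []) lv.2) else d.get? k := by
  simp [pvStepV, PySem.Dict.get?_insert]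

-- prefixes at the character level
lemma pvPrefs_toList (cs : List Char) (acc : String) :
    (pvPrefs acc cs).map String.toList
      = (List.range cs.length).map (fun j => acc.toList ++ cs.take (j + 1)) := by
  induction cs generalizing acc with
  | nil => simp [pvPrefs]
  | cons c cs ih =>
    rw [pvPrefs, List.map_cons, ih, List.length_cons, List.range_succ_eq_map]
    simp [String.toList_push, List.map_map, Function.comp_def]

lemma pvPyRange_one (n : Nat) :
    PySem.List.pyRange 1 (n : Int) = (List.range (n - 1)).map (fun j => ((j + 1 : Nat) : Int)) := by
  induction n with
  | zero => decide
  | succ m ih =>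
    rcases m with _ | m
    · decide
    · have h1 : (1 : Int) ≤ ((m + 1 : Nat) : Int) := by push_cast; omega
      have hcast : ((m + 2 : Nat) : Int) = ((m + 1 : Nat) : Int) + 1 := by push_cast; ring
      rw [hcast, PySem.List.pyRange_one_succ_right h1, ih]
      rw [show (m + 2) - 1 = (m + 1 - 1) + 1 from rfl, List.range_succ, List.map_append]
      simp

lemma pvProps_toList (l : String) :
    (pvProps l).map String.toList
      = (List.range (l.toList.length - 1)).map (fun j => l.toList.take (j + 1)) := by
  rw [pvProps, PySem.Str.len_eq, pvPyRange_one, List.map_map, List.map_map]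
  refine List.map_congr_left (fun j _ => ?_)
  rw [Function.comp_apply, Function.comp_apply, PySem.Str.toList_slice,
    PySem.Chars.slice_eq_listSlice, PySem.List.slice_to_natCast]

lemma pvPrefs_group (l : String) (h : l.toList ≠ []) :
    pvPrefs "" l.toList = pvProps l ++ [l] := by
  have hinj : Function.Injective String.toList := fun a b hab => String.toList_inj.mp hab
  apply List.map_injective_iff.mpr hinj
  rw [pvPrefs_toList, List.map_append, pvProps_toList]
  have hpos : 0 < l.toList.length := List.length_pos_iff.mpr h
  have hn : l.toList.length = (l.toList.length - 1) + 1 := by omega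
  rw [hn, List.range_succ, List.map_append]
  simp only [List.map_cons, List.map_nil]
  rw [← hn, List.take_length]
  simp

lemma pvUpdate_group (S : PySem.Set String) (l : String) :
    PySem.Set.update S (l :: pvPrefs "" l.toList) = PySem.Set.update S (l :: pvProps l) := by
  by_cases h : l.toList = []
  · have hp : pvProps l = [] := by
      rw [pvProps, PySem.Str.len_eq, h]
      simp
    rw [h, hp, pvPrefs]
  · rw [pvPrefs_group l h, PySem.Set.update_cons, PySem.Set.update_cons,
      PySem.Set.update_append]
    have hm : l ∈ (PySem.Set.add S l).update (pvProps l) := by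
      rw [PySem.Set.mem_update]
      exact Or.inl (by rw [PySem.Set.mem_add]; exact Or.inr rfl)
    rw [PySem.Set.update_cons, PySem.Set.add_of_mem hm, PySem.Set.update_nil]

-- abbreviations for the three folds
def pvDA (ps : List (String × Int)) : PySem.Dict String (Option (List Int)) :=
  ps.foldl pvStepA PySem.Dict.empty
def pvDV (ps : List (String × Int)) : PySem.Dict String (List Int) :=
  ps.foldl pvStepV PySem.Dict.empty
def pvKB (ps : List (String × Int)) : List String :=
  ps.foldl pvStepK []

-- the main invariant: A's dict has B's key order, carries B's value sets, and dominates them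
lemma pvMain (ps : List (String × Int)) :
    (pvDA ps).keys = PySem.Set.ofList (pvKB ps)
    ∧ (∀ k, (pvDA ps).get? k =
        if k ∈ (pvDA ps).keys then some ((pvDV ps).get? k) else none)
    ∧ (∀ k, (pvDV ps).get? k ≠ none → k ∈ (pvDA ps).keys) := by
  induction ps using List.reverseRecOn with
  | nil => simp [pvDA, pvDV, pvKB, PySem.Set.ofList_nil]
  | append_singleton ps p ih =>
    obtain ⟨ihK, ihG, ihV⟩ := ih
    have hA : pvDA (ps ++ [p]) = pvStepA (pvDA ps) p := by
      simp [pvDA, List.foldl_append]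
    have hV : pvDV (ps ++ [p]) = pvStepV (pvDV ps) p := by
      simp [pvDV, List.foldl_append]
    have hK : pvKB (ps ++ [p]) = pvKB ps ++ (p.1 :: pvProps p.1) := by
      simp [pvKB, List.foldl_append, pvStepK_eq]
    -- keys statement
    have keyEq : (pvDA (ps ++ [p])).keys
        = PySem.Set.ofList (pvKB (ps ++ [p])) := by
      rw [hA, pvStepA_keys, hK, PySem.Set.ofList_append, ihK, pvUpdate_group]
    -- the current set of A at p.1 equals B's collected set
    have hcur : pvCurSet (pvDA ps) p.1 = (pvDV ps).getD p.1 [] := by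
      rw [PySem.Dict.getD_eq_get?_getD]
      by_cases hm : p.1 ∈ (pvDA ps).keys
      · have := ihG p.1
        rw [if_pos hm] at this
        rcases hv : (pvDV ps).get? p.1 with _ | s <;>
          simp [pvCurSet, this, hv]
      · have h0 : (pvDA ps).get? p.1 = none := by
          have := ihG p.1; rwa [if_neg hm] at this
        have h1 : (pvDV ps).get? p.1 = none := by
          by_contra hne
          exact hm (ihV p.1 hne)
        simp [pvCurSet, h0, h1]
    refine ⟨keyEq, ?_, ?_⟩
    · intro k
      rw [hA, pvStepA_get?, hcur, hV, pvStepV_get?]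
      have hkeys' : (pvStepA (pvDA ps) p).keys
          = PySem.Set.update (pvDA ps).keys (p.1 :: pvPrefs "" p.1.toList) :=
        pvStepA_keys _ _
      rw [hkeys']
      by_cases hk : k = p.1
      · have hmem : k ∈ PySem.Set.update (pvDA ps).keys (p.1 :: pvPrefs "" p.1.toList) := by
          rw [PySem.Set.mem_update]; exact Or.inr (by simp [hk])
        rw [if_pos hk, if_pos hmem, if_pos hk]
      · rw [if_neg hk, if_neg hk]
        by_cases hc : (pvDA ps).contains k = false ∧ k ∈ pvPrefs "" p.1.toList
        · rw [if_pos hc]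
          have hmem : k ∈ PySem.Set.update (pvDA ps).keys (p.1 :: pvPrefs "" p.1.toList) := by
            rw [PySem.Set.mem_update]; exact Or.inr (List.mem_cons_of_mem _ hc.2)
          rw [if_pos hmem]
          have hnotk : k ∉ (pvDA ps).keys := fun hmm =>
            by simp [(PySem.Dict.contains_iff_mem_keys _ k).mpr hmm] at hc
          have h1 : (pvDV ps).get? k = none := by
            by_contra hne
            exact hnotk (ihV k hne)
          rw [h1]
        · rw [if_neg hc, ihG k]
          have hiff : (k ∈ PySem.Set.update (pvDA ps).keys (p.1 :: pvPrefs "" p.1.toList))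
              ↔ k ∈ (pvDA ps).keys := by
            rw [PySem.Set.mem_update]
            constructor
            · rintro (hmm | hmm)
              · exact hmm
              · rcases List.mem_cons.mp hmm with hmm' | hmm'
                · exact absurd hmm' hk
                · by_cases hck : (pvDA ps).contains k = true
                  · exact (PySem.Dict.contains_iff_mem_keys _ k).mp hck
                  · exact absurd ⟨by simpa using hck, hmm'⟩ hc
            · exact Or.inl
          by_cases hmem : k ∈ (pvDA ps).keys
          · rw [if_pos (hiff.mpr hmem), if_pos hmem]
          · rw [if_neg (fun hx => hmem (hiff.mp hx)), if_neg hmem]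
    · intro k hk
      rw [hV, pvStepV_get?] at hk
      rw [hA, pvStepA_keys, PySem.Set.mem_update]
      by_cases hkp : k = p.1
      · exact Or.inr (hkp ▸ List.mem_cons_self)
      · rw [if_neg hkp] at hk
        exact Or.inl (ihV k hk)

-- ===== VERDICT (by name: the statement is the Claim_ definition above) =====
theorem make_start_dict_spec : Claim_equal_make_start_dict := by
  intro lv _dom
  show make_start_dict lv = make_start_dict_alt lv
  obtain ⟨hK, hG, _⟩ := pvMain lv
  have hnd : (pvDA lv).keys.Nodup := by
    rw [hK]; exact PySem.Set.nodup_ofList _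
  have h1 : make_start_dict lv = (pvDA lv).keys.map (fun k => (k, (pvDA lv).getD k none)) :=
    PySem.Dict.items_eq_map_keys _ hnd none
  rw [h1]
  have h2 : (pvDA lv).keys.map (fun k => (k, (pvDA lv).getD k none))
      = (pvDA lv).keys.map (fun k => (k, (pvDV lv).get? k)) := by
    refine List.map_congr_left (fun k hk => ?_)
    have := hG k
    rw [if_pos hk] at this
    rw [PySem.Dict.getD_eq_get?_getD, this]
    rfl
  rw [h2, hK, ← PySem.List.dedup_eq_ofList]
  simp only [make_start_dict_alt, pvDV, pvKB]
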